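-- pv_equiv track=rewrite | github.com/sehsanm/sbudspwordembedding | util/letters.py | extract_letter_grams
-- ===== SOURCE A (Python) =====
-- def extract_letter_grams(main_str, max_len):
--     str = '[' + main_str + ']'
--     ret = set()
--     for i in range(1, max_len + 1):
--         for j in range(0, len(str) - i + 1):
--             l_gram = str[j:(j + i)]
--             if (l_gram.find(' ') == -1):
--                 ret.add(l_gram)
--     return ret
-- ===== SOURCE B (Python) =====
-- def extract_letter_grams(main_str, max_len):
--     segments = ('[' + main_str + ']').split(' ')
--     ret = set()
--     for i in range(1, max_len + 1):
--         for seg in segments: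
--             while len(seg) >= i:
--                 ret.add(seg[:i])
--                 seg = seg[1:]
--     return ret
-- ===== Notes on version B (the rewrite author's own statement) =====
-- stated objective: alternative
-- what changed: B splits the bracketed string on ' ' into space-free segments and, per length, walks each segment's suffixes with a while loop taking the prefix of each, instead of enumerating every substring by index and filtering out those containing a space.
import Mathlib
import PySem

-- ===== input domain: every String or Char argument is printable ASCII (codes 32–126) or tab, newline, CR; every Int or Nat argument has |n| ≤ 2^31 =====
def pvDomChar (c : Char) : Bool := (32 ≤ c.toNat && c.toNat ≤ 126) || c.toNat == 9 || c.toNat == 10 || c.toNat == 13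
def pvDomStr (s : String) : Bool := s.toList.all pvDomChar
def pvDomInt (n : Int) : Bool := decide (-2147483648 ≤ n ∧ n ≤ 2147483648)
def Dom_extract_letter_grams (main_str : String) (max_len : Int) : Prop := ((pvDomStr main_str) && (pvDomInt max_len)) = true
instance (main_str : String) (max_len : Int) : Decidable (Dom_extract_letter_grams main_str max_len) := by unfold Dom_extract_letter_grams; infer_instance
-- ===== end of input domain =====

-- B splits the bracketed string on ' ' into space-free segments and, per length, walks each
-- segment's suffixes with a while loop taking the prefix of each, instead of enumerating every
-- substring by index and filtering out those containing a space (alternative decomposition).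

-- ===== PORT A =====
-- A's set of strings is modelled as a PySem.Set over List Char (the PySem string carrier),
-- converted to List String at the end.
def extract_letter_grams (main_str : String) (max_len : Int) : List String :=
  let str : List Char := '[' :: main_str.toList ++ [']']   -- '[' + main_str + ']'
  let ret : PySem.Set (List Char) :=
    (PySem.List.pyRange 1 (max_len + 1)).foldl (fun ret i =>
      (PySem.List.pyRange 0 ((str.length : Int) - i + 1)).foldl (fun ret j =>
        let l_gram := PySem.List.slice str (some j) (some (j + i))
        if PySem.Chars.find l_gram [' '] = -1 then PySem.Set.add ret l_gram else ret) ret)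
      PySem.Set.empty
  ret.map String.ofList

-- ===== PORT B =====
-- the 'while len(seg) >= i: ret.add(seg[:i]); seg = seg[1:]' loop of Source B, as structural
-- recursion on seg (i ≥ 1 whenever called, since i ranges over range(1, max_len+1))
def pvWhileGrams (i : Nat) (seg : List Char) (ret : PySem.Set (List Char)) :
    PySem.Set (List Char) :=
  match seg with
  | [] => ret
  | c :: r =>
    if i ≤ r.length + 1 then pvWhileGrams i r (PySem.Set.add ret ((c :: r).take i)) else ret

def extract_letter_grams_alt (main_str : String) (max_len : Int) : List String :=
  let segments := PySem.Chars.splitOn ('[' :: main_str.toList ++ [']']) [' ']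
  let ret : PySem.Set (List Char) :=
    (PySem.List.pyRange 1 (max_len + 1)).foldl (fun ret i =>
      segments.foldl (fun ret seg => pvWhileGrams i.toNat seg ret) ret)
      PySem.Set.empty
  ret.map String.ofList

-- ===== PRECONDITION & SPEC =====
def Spec_extract_letter_grams (main_str : String) (max_len : Int) (out : List String) : Prop := out = extract_letter_grams_alt main_str max_len
instance (main_str : String) (max_len : Int) (out : List String) : Decidable (Spec_extract_letter_grams main_str max_len out) := by unfold Spec_extract_letter_grams; infer_instance

-- ===== CLAIM (what is proved, stated in full; the proofs are below) =====
def Claim_equal_extract_letter_grams : Prop := ∀ (main_str : String) (max_len : Int), Dom_extract_letter_grams main_str max_len → Spec_extract_letter_grams main_str max_len (extract_letter_grams main_str max_len)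

-- ===== LEMMAS AND PROOFS =====

-- all substrings of length k of s (k ≥ 1), left to right
def pvGrams (s : List Char) (k : Nat) : List (List Char) :=
  (List.range (s.length + 1 - k)).map (fun j => (s.drop j).take k)

-- recursive characterisation of s.split(' ')
def pvSplit : List Char → List (List Char)
  | [] => [[]]
  | c :: r => if c = ' ' then [] :: pvSplit r else (c :: (pvSplit r).headI) :: (pvSplit r).tail

lemma pvSplit_ne_nil (s : List Char) : pvSplit s ≠ [] := by
  cases s with
  | nil => simp [pvSplit]
  | cons c r => simp only [pvSplit]; split <;> simp

lemma pvSplit_headI (r : List Char) :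
    (pvSplit r).headI = r.takeWhile (fun c => !(c == ' ')) := by
  induction r with
  | nil => simp [pvSplit]
  | cons c r ih =>
    by_cases hc : c = ' '
    · subst hc; simp [pvSplit]
    · simp [pvSplit, hc, ih]

lemma pvGo (fuel : Nat) : ∀ (l cur : List Char) (accs : List (List Char)),
    l.length < fuel →
    PySem.Chars.splitOn.go [' '] fuel l cur accs
      = accs.reverse ++ (cur.reverse ++ (pvSplit l).headI) :: (pvSplit l).tail := by
  induction fuel with
  | zero => intro l cur accs h; omega
  | succ f ih =>
    intro l cur accs h
    cases l with
    | nil => simp [PySem.Chars.splitOn.go, pvSplit]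
    | cons c rest =>
      by_cases hc : c = ' '
      · subst hc
        rw [show PySem.Chars.splitOn.go [' '] (f + 1) (' ' :: rest) cur accs
              = PySem.Chars.splitOn.go [' '] f rest [] (cur.reverse :: accs) from by
            simp [PySem.Chars.splitOn.go, List.isPrefixOf]]
        rw [ih rest [] (cur.reverse :: accs) (by simp at h; omega)]
        cases hsr : pvSplit rest with
        | nil => exact absurd hsr (pvSplit_ne_nil rest)
        | cons w t => simp [pvSplit, hsr]
      · rw [show PySem.Chars.splitOn.go [' '] (f + 1) (c :: rest) cur accs
              = PySem.Chars.splitOn.go [' '] f rest (c :: cur) accs from by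
            simp [PySem.Chars.splitOn.go, List.isPrefixOf, Ne.symm hc]]
        rw [ih rest (c :: cur) accs (by simp at h; omega)]
        simp [pvSplit, hc]

lemma pvSplitOn_eq (s : List Char) : PySem.Chars.splitOn s [' '] = pvSplit s := by
  rw [PySem.Chars.splitOn, pvGo (s.length + 1) s [] [] (by omega)]
  cases hs : pvSplit s with
  | nil => exact absurd hs (pvSplit_ne_nil s)
  | cons w t => simp

lemma pvRange_zero (N : Int) :
    PySem.List.pyRange 0 N = List.map (fun k : Nat => (k : Int)) (List.range N.toNat) := by
  have h1 : (0:Int) < 1 := by norm_num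
  simp only [PySem.List.pyRange, if_neg (one_ne_zero), if_pos h1]
  by_cases h : 0 < N
  · rw [if_pos h]
    have h2 : N - 0 + 1 - 1 = N := by ring
    rw [h2, Int.ediv_one]
    simp
  · rw [if_neg h]
    simp [Int.toNat_of_nonpos (by omega : N ≤ 0)]

lemma pvInfix_singleton (a : Char) (l : List Char) : [a] <:+: l ↔ a ∈ l := by
  constructor
  · intro h; exact h.subset (by simp)
  · intro h
    obtain ⟨u, v, rfl⟩ := List.append_of_mem h
    exact ⟨u, v, by simp⟩

lemma pvFind_space (g : List Char) :
    (PySem.Chars.find g [' '] = -1) ↔ ((!g.contains ' ') = true) := by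
  rw [PySem.Chars.find_eq_neg_one_iff, pvInfix_singleton]
  simp

lemma pvFoldl_add_filter {α : Type} [BEq α] (p : α → Bool) (l : List α) (r : PySem.Set α) :
    l.foldl (fun r x => if p x then PySem.Set.add r x else r) r
      = (l.filter p).foldl PySem.Set.add r := by
  induction l generalizing r with
  | nil => rfl
  | cons a l ih => by_cases h : p a <;> simp [h, ih]

lemma pvLoopA (s : List Char) (k : Nat) (r : PySem.Set (List Char)) :
    (PySem.List.pyRange 0 ((s.length : Int) - (k : Int) + 1)).foldl
      (fun ret j =>
        let l_gram := PySem.List.slice s (some j) (some (j + (k : Int)))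
        if PySem.Chars.find l_gram [' '] = -1 then PySem.Set.add ret l_gram else ret) r
    = ((pvGrams s k).filter (fun g => !g.contains ' ')).foldl PySem.Set.add r := by
  rw [pvRange_zero, List.foldl_map, ← pvFoldl_add_filter]
  have hN : ((s.length : Int) - (k : Int) + 1).toNat = s.length + 1 - k := by omega
  rw [hN]
  unfold pvGrams
  rw [List.foldl_map]
  refine PySem.List.foldl_congr_mem _ _ _ _ ?_
  intro acc jn _
  have hjk : (jn : Int) + (k : Int) = ((jn + k : Nat) : Int) := by push_cast; ring
  dsimp only
  rw [hjk, PySem.List.slice_natCast, Nat.add_sub_cancel_left]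
  exact if_congr (pvFind_space _) rfl rfl

lemma pvGrams_cons (c : Char) (r : List Char) (k : Nat) (_hk : 1 ≤ k) :
    pvGrams (c :: r) k = (if k ≤ r.length + 1 then [(c :: r).take k] else []) ++ pvGrams r k := by
  by_cases h : k ≤ r.length + 1
  · rw [if_pos h]
    have h2 : (c :: r).length + 1 - k = (r.length + 1 - k) + 1 := by
      simp only [List.length_cons]; omega
    simp only [pvGrams, h2, List.range_succ_eq_map, List.map_cons, List.map_map]
    simp [Function.comp_def]
  · rw [if_neg h]
    simp only [pvGrams, List.length_cons]
    rw [show r.length + 1 + 1 - k = 0 from by omega, show r.length + 1 - k = 0 from by omega]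
    simp

-- the while loop of B collects exactly the length-k substrings, left to right
lemma pvWhile_eq (k : Nat) (hk : 1 ≤ k) (seg : List Char) (r : PySem.Set (List Char)) :
    pvWhileGrams k seg r = (pvGrams seg k).foldl PySem.Set.add r := by
  induction seg generalizing r with
  | nil =>
    have : pvGrams [] k = [] := by
      simp only [pvGrams, List.length_nil]
      rw [show 0 + 1 - k = 0 from by omega]; simp
    simp [pvWhileGrams, this]
  | cons c rest ih =>
    rw [pvWhileGrams, pvGrams_cons _ _ _ hk]
    by_cases h : k ≤ rest.length + 1
    · rw [if_pos h, if_pos h, ih, List.cons_append, List.nil_append, List.foldl_cons]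
    · have hnil : pvGrams rest k = [] := by
        simp only [pvGrams]
        rw [show rest.length + 1 - k = 0 from by omega]; simp
      rw [if_neg h, if_neg h, hnil]
      simp

lemma pvSegsFold (segs : List (List Char)) (k : Nat) (hk : 1 ≤ k) (r : PySem.Set (List Char)) :
    segs.foldl (fun ret seg => pvWhileGrams k seg ret) r
      = (segs.flatMap (fun seg => pvGrams seg k)).foldl PySem.Set.add r := by
  induction segs generalizing r with
  | nil => rfl
  | cons seg segs ih =>
    rw [List.foldl_cons, pvWhile_eq k hk, ih, List.flatMap_cons, List.foldl_append]

lemma pvTW (r : List Char) (k : Nat) :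
    (k ≤ r.length ∧ ' ' ∉ r.take k) ↔ k ≤ (r.takeWhile (fun c => !(c == ' '))).length := by
  induction r generalizing k with
  | nil => simp
  | cons c r ih =>
    cases k with
    | zero => simp
    | succ m =>
      by_cases hc : c = ' '
      · subst hc; simp
      · rw [show ((c :: r).takeWhile (fun c => !(c == ' ')))
              = c :: r.takeWhile (fun c => !(c == ' ')) from by
            simp [hc]]
        simp only [List.take_succ_cons, List.length_cons, List.mem_cons, not_or]
        constructor
        · rintro ⟨h1, h2⟩
          have := (ih m).mp ⟨by omega, h2.2⟩
          omega
        · intro h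
          have h' : m ≤ (r.takeWhile (fun c => !(c == ' '))).length := by omega
          have := (ih m).mpr h'
          exact ⟨by omega, fun hsp => hc hsp.symm, this.2⟩

lemma pvTW_take (r : List Char) (k : Nat)
    (h : k ≤ (r.takeWhile (fun c => !(c == ' '))).length) :
    r.take k = (r.takeWhile (fun c => !(c == ' '))).take k := by
  have hpre := List.takeWhile_prefix (l := r) (p := fun c => !(c == ' '))
  obtain ⟨t, ht⟩ := hpre
  conv_lhs => rw [← ht]
  rw [List.take_append_of_le_length h]

lemma pvCore (k : Nat) (hk : 1 ≤ k) (s : List Char) :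
    (pvGrams s k).filter (fun g => !g.contains ' ')
      = (pvSplit s).flatMap (fun seg => pvGrams seg k) := by
  have hnil : pvGrams [] k = [] := by
    simp only [pvGrams, List.length_nil]
    rw [show 0 + 1 - k = 0 from by omega]
    simp
  obtain ⟨m, rfl⟩ : ∃ m, k = m + 1 := ⟨k - 1, by omega⟩
  induction s with
  | nil => simp [pvSplit, hnil]
  | cons c r ih =>
    by_cases hc : c = ' '
    · subst hc
      rw [pvGrams_cons _ _ _ hk, List.filter_append, ih]
      have hsp : List.filter (fun g => !g.contains ' ')
          (if m + 1 ≤ r.length + 1 then [(' ' :: r).take (m + 1)] else []) = [] := by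
        split
        · simp [List.take_succ_cons]
        · rfl
      rw [hsp]
      simp [pvSplit, hnil]
    · cases hsr : pvSplit r with
      | nil => exact absurd hsr (pvSplit_ne_nil r)
      | cons w t =>
        have hw : w = r.takeWhile (fun c => !(c == ' ')) := by
          have := pvSplit_headI r; rw [hsr] at this; simpa using this
        have hsc : pvSplit (c :: r) = (c :: w) :: t := by
          simp only [pvSplit, if_neg hc, hsr, List.headI_cons, List.tail_cons]
        rw [pvGrams_cons _ _ _ hk, List.filter_append, hsc, List.flatMap_cons,
          pvGrams_cons _ _ _ hk, ih, hsr, List.flatMap_cons, List.append_assoc]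
        congr 1
        by_cases hB : m + 1 ≤ w.length + 1
        · have hr : m ≤ r.length ∧ ' ' ∉ r.take m := (pvTW r m).mpr (by rw [← hw]; omega)
          rw [if_pos (by omega), if_pos hB, List.take_succ_cons, List.take_succ_cons]
          have htk : r.take m = w.take m := by
            rw [hw]; exact pvTW_take r m (by rw [← hw]; omega)
          rw [htk] at hr ⊢
          simp [Ne.symm hc, hr.2]
        · rw [if_neg hB]
          by_cases hlen : m + 1 ≤ r.length + 1
          · have hmem : ' ' ∈ r.take m := by
              by_contra hx
              exact hB (by rw [hw] at *; have := (pvTW r m).mp ⟨by omega, hx⟩; omega)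
            rw [if_pos hlen, List.take_succ_cons]
            simp [hmem]
          · rw [if_neg hlen, List.filter_nil]

-- ===== VERDICT (by name: the statement is the Claim_ definition above) =====
theorem extract_letter_grams_spec : Claim_equal_extract_letter_grams := by
  intro main_str max_len _
  unfold Spec_extract_letter_grams extract_letter_grams extract_letter_grams_alt
  dsimp only
  congr 1
  refine PySem.List.foldl_congr_mem _ _ _ _ ?_
  intro acc i hi
  have h1 : (1:Int) ≤ i := (PySem.List.mem_pyRange_one.mp hi).1
  have hik : i = ((i.toNat : Nat) : Int) := by omega
  have hk : 1 ≤ i.toNat := by omega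
  rw [hik, pvLoopA, pvCore i.toNat hk, pvSplitOn_eq, Int.toNat_natCast,
    pvSegsFold _ _ hk]
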